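-- pv_equiv track=rewrite | github.com/nnqtruong/CodePath | Unit2/Session2Unit2/Problem2.py | is_authentic_collection
-- ===== SOURCE A (Python) =====
-- def is_authentic_collection(art_pieces):
--     from collections import Counter
--     art_counter = Counter(art_pieces)
--     max_key = max(art_counter, key=int)
--     if art_counter[max_key] !=2:
--         return False
--     art_counter[max_key] = 1
--     for i in art_counter.values():
--         if i != 1:
--             return False
--     return len(set(art_pieces)) != max_key +1
-- ===== SOURCE B (Python) =====
-- def is_authentic_collection(art_pieces):
--     s = sorted(art_pieces)
--
--     def ends_with_one_dup(t):
--         # t is strictly increasing except that its last two elements are equal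
--         if len(t) == 2:
--             return t[0] == t[1]
--         return len(t) > 2 and t[0] < t[1] and ends_with_one_dup(t[1:])
--
--     return ends_with_one_dup(s) and len(s) - 1 != s[-1] + 1
-- ===== Notes on version B (the rewrite author's own statement) =====
-- stated objective: alternative
-- what changed: B sorts the list and checks its shape by a recursive scan (strictly increasing except the last two elements equal, i.e. the only duplicate is the maximum), replacing A's Counter frequency table and per-count loop.
import Mathlib
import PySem

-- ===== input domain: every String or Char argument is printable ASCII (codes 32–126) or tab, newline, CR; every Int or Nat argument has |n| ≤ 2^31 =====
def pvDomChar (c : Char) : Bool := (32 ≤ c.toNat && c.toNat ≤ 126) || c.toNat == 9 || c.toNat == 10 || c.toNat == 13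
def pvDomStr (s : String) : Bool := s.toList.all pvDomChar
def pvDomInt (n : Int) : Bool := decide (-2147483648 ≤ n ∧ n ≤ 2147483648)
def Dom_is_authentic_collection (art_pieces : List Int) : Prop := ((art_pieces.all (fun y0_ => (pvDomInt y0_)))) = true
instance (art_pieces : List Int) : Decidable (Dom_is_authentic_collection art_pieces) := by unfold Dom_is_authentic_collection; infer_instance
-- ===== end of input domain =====

-- B sorts the list and checks the sorted shape by a recursive scan (strictly increasing
-- except that the last two elements are equal) instead of A's Counter table and count loop
-- (objective: alternative algorithm).

-- ===== PORT A =====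
def is_authentic_collection (art_pieces : List Int) : Bool :=
  let art_counter := PySem.Dict.counter art_pieces
  match PySem.List.max? art_counter.keys (fun k => k) with
  | none => false   -- Python raises ValueError here (empty input); excluded by Pre_
  | some max_key =>
    if art_counter.getD max_key 0 ≠ 2 then false
    else
      let c2 := art_counter.insert max_key 1
      if c2.values.any (fun i => i ≠ 1) then false
      else decide (((PySem.Set.ofList art_pieces).length : Int) ≠ max_key + 1)

-- ===== PORT B =====
-- helper ends_with_one_dup of Source B: recursion on the sorted list
def endsWithOneDup : List Int → Bool
  | [a, b] => a == b
  | a :: b :: c :: r => decide (a < b) && endsWithOneDup (b :: c :: r)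
  | _ => false

def is_authentic_collection_alt (art_pieces : List Int) : Bool :=
  let s := PySem.List.sorted art_pieces (fun x => x) false
  endsWithOneDup s &&
    (match PySem.List.pyGet? s (-1) with
     | none => false   -- unreachable: Python's 'and' short-circuits, s ≠ [] when reached
     | some last => decide ((s.length : Int) - 1 ≠ last + 1))

-- ===== PRECONDITION & SPEC =====
-- Python A raises ValueError (max of an empty sequence) on the empty list; that input is excluded.
def Pre_is_authentic_collection (art_pieces : List Int) : Prop := art_pieces ≠ []
instance (art_pieces : List Int) : Decidable (Pre_is_authentic_collection art_pieces) := by unfold Pre_is_authentic_collection; infer_instance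
def pvWitness_is_authentic_collection : List Int := [1, 2, 2]

def Spec_is_authentic_collection (art_pieces : List Int) (out : Bool) : Prop := out = is_authentic_collection_alt art_pieces
instance (art_pieces : List Int) (out : Bool) : Decidable (Spec_is_authentic_collection art_pieces out) := by unfold Spec_is_authentic_collection; infer_instance

-- ===== CLAIM (what is proved, stated in full; the proofs are below) =====
def Claim_equal_is_authentic_collection : Prop := ∀ (art_pieces : List Int), Dom_is_authentic_collection art_pieces → Pre_is_authentic_collection art_pieces → Spec_is_authentic_collection art_pieces (is_authentic_collection art_pieces)

-- ===== LEMMAS AND PROOFS =====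

-- a Pairwise (≤) list without duplicates is Pairwise (<)
lemma pairwise_lt_of_le_nodup : ∀ {l : List Int}, l.Pairwise (· ≤ ·) → l.Nodup → l.Pairwise (· < ·) := by
  intro l hle hnd
  induction l with
  | nil => simp
  | cons a l ih =>
    rw [List.pairwise_cons] at hle ⊢
    rw [List.nodup_cons] at hnd
    exact ⟨fun x hx => lt_of_le_of_ne (hle.1 x hx) (fun heq => hnd.1 (heq ▸ hx)),
           ih hle.2 hnd.2⟩

-- shape characterisation of the recursive scan: strictly increasing, last element duplicated
lemma ewod_iff (s : List Int) :
    endsWithOneDup s = true ↔ ∃ t m, s = t ++ [m, m] ∧ (t ++ [m]).Pairwise (· < ·) := by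
  induction s with
  | nil =>
    constructor
    · intro h; simp [endsWithOneDup] at h
    · rintro ⟨t, m, h, -⟩
      have := congrArg List.length h; simp at this
  | cons a s ih =>
    cases s with
    | nil =>
      constructor
      · intro h; simp [endsWithOneDup] at h
      · rintro ⟨t, m, h, -⟩
        have := congrArg List.length h; simp at this
    | cons b s =>
      cases s with
      | nil =>
        -- s = [a, b]
        constructor
        · intro h
          simp only [endsWithOneDup, beq_iff_eq] at h
          exact ⟨[], a, by simp [h], by simp⟩
        · rintro ⟨t, m, h, -⟩
          have hlen : t = [] := by
            have := congrArg List.length h; simp at this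
            exact this
          subst hlen
          simp at h
          simp [endsWithOneDup, h.1, h.2]
      | cons c r =>
        -- s = a :: b :: c :: r
        constructor
        · intro h
          simp only [endsWithOneDup, Bool.and_eq_true, decide_eq_true_eq] at h
          obtain ⟨hab, htail⟩ := h
          obtain ⟨t, m, heq, hpw⟩ := ih.mp htail
          refine ⟨a :: t, m, by simp [heq], ?_⟩
          have ha : ∀ x ∈ t ++ [m], a < x := by
            cases t with
            | nil =>
              simp at heq
              intro x hx; simp at hx
              simpa [hx, ← heq.1] using hab
            | cons u t2 =>
              simp at heq
              obtain ⟨hbu, -⟩ := heq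
              rw [List.cons_append, List.pairwise_cons] at hpw
              intro x hx
              rw [List.cons_append, List.mem_cons] at hx
              rcases hx with rfl | hx
              · exact hbu ▸ hab
              · exact lt_trans (hbu ▸ hab) (hpw.1 x hx)
          rw [List.cons_append, List.pairwise_cons]
          exact ⟨ha, hpw⟩
        · rintro ⟨t, m, heq, hpw⟩
          cases t with
          | nil => simp at heq
          | cons u t2 =>
            rw [List.cons_append] at heq
            injection heq with hau heq2
            subst hau
            rw [List.cons_append, List.pairwise_cons] at hpw
            have htail : endsWithOneDup (b :: c :: r) = true :=
              ih.mpr ⟨t2, m, heq2, hpw.2⟩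
            have hb_mem : b ∈ t2 ++ [m] := by
              cases t2 with
              | nil =>
                injection heq2 with hbm hrest
                simp [hbm]
              | cons v t3 =>
                rw [List.cons_append] at heq2
                injection heq2 with hbv hrest
                simp [hbv]
            have hab : a < b := hpw.1 b hb_mem
            simp [endsWithOneDup, hab, htail]

-- forward: if the scan accepts sorted(xs), the max occurs twice, all else once, and
-- the distinct count is len - 1; also names the last element of the sorted list
lemma ewod_fwd (xs : List Int)
    (h : endsWithOneDup (PySem.List.sorted xs (fun x => x) false) = true) :
    ∃ m, m ∈ xs ∧ (∀ y ∈ xs, y ≤ m) ∧ xs.count m = 2 ∧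
      (∀ k ∈ xs, k ≠ m → xs.count k = 1) ∧
      xs.length = (PySem.Set.ofList xs).length + 1 ∧
      PySem.List.pyGet? (PySem.List.sorted xs (fun x => x) false) (-1) = some m := by
  obtain ⟨t, m, heq, hpw⟩ := (ewod_iff _).mp h
  have hperm : (PySem.List.sorted xs (fun x => x) false).Perm xs := PySem.List.sorted_perm ..
  rw [heq] at hperm
  have hsplit := List.pairwise_append.mp hpw
  have htm : ∀ x ∈ t, x < m := fun x hx => hsplit.2.2 x hx m (by simp)
  have hnd_t : t.Nodup := hsplit.1.imp (fun h => ne_of_lt h)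
  have hmnot : m ∉ t := fun hm => lt_irrefl m (htm m hm)
  refine ⟨m, ?_, ?_, ?_, ?_, ?_, ?_⟩
  · exact hperm.mem_iff.mp (by simp)
  · intro y hy
    have hmem : y ∈ t ++ [m, m] := hperm.mem_iff.mpr hy
    simp at hmem
    rcases hmem with hy' | rfl
    · exact le_of_lt (htm y hy')
    · exact le_refl _
  · rw [← hperm.count_eq]
    simp [List.count_append, List.count_eq_zero_of_not_mem hmnot]
  · intro k hk hkm
    rw [← hperm.count_eq]
    have hkmem : k ∈ t ++ [m, m] := hperm.mem_iff.mpr hk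
    simp [hkm] at hkmem
    have hz : List.count k [m, m] = 0 := by
      rw [List.count_eq_zero]; simp [hkm]
    rw [List.count_append, List.count_eq_one_of_mem hnd_t hkmem, hz]
  · have hndtm : (t ++ [m]).Nodup := hpw.imp (fun h => ne_of_lt h)
    have hsp : (PySem.Set.ofList xs).Perm (t ++ [m]) := by
      rw [List.perm_ext_iff_of_nodup (PySem.Set.nodup_ofList xs) hndtm]
      intro x
      rw [PySem.Set.mem_ofList, ← hperm.mem_iff]
      simp
    have h1 := hsp.length_eq
    have h2 := hperm.length_eq
    simp at h1 h2
    omega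
  · rw [heq]
    have : t ++ [m, m] = (t ++ [m]) ++ [m] := by simp
    rw [this, PySem.List.pyGet?_neg_one_append_singleton]

-- backward: those count conditions force the sorted list into the accepted shape
lemma ewod_bwd (xs : List Int) (a : Int) (hax : a ∈ xs) (hmax : ∀ y ∈ xs, y ≤ a)
    (h2 : xs.count a = 2) (h1 : ∀ k ∈ xs, k ≠ a → xs.count k = 1) :
    endsWithOneDup (PySem.List.sorted xs (fun x => x) false) = true := by
  set t := PySem.List.sorted ((PySem.Set.ofList xs).erase a) (fun x => x) false with ht
  have hperm_t : t.Perm ((PySem.Set.ofList xs).erase a) := PySem.List.sorted_perm ..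
  have hnd_e : ((PySem.Set.ofList xs).erase a).Nodup := (PySem.Set.nodup_ofList xs).erase a
  have hnd_t : t.Nodup := hperm_t.symm.nodup hnd_e
  have hple : t.Pairwise (· ≤ ·) := PySem.List.sorted_pairwise ..
  have hplt : t.Pairwise (· < ·) := pairwise_lt_of_le_nodup hple hnd_t
  have hmem_t : ∀ k, k ∈ t ↔ (k ≠ a ∧ k ∈ xs) := by
    intro k
    rw [hperm_t.mem_iff, (PySem.Set.nodup_ofList xs).mem_erase_iff, PySem.Set.mem_ofList]
  have htlt : ∀ k ∈ t, k < a := fun k hk =>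
    lt_of_le_of_ne (hmax k ((hmem_t k).mp hk).2) ((hmem_t k).mp hk).1
  have hanot : a ∉ t := fun hm => lt_irrefl a (htlt a hm)
  have hys_perm : (t ++ [a, a]).Perm xs := by
    rw [List.perm_iff_count]
    intro k
    by_cases hka : k = a
    · subst hka
      rw [List.count_append, List.count_eq_zero_of_not_mem hanot, h2]
      simp
    · have hz : List.count k [a, a] = 0 := by
        rw [List.count_eq_zero]; simp [hka]
      rw [List.count_append, hz]
      by_cases hkx : k ∈ xs
      · have hkt : k ∈ t := (hmem_t k).mpr ⟨hka, hkx⟩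
        rw [List.count_eq_one_of_mem hnd_t hkt, h1 k hkx hka]
      · rw [List.count_eq_zero_of_not_mem (fun hkt => hkx ((hmem_t k).mp hkt).2),
            List.count_eq_zero_of_not_mem hkx]
  have hys_sorted : (t ++ [a, a]).Pairwise (· ≤ ·) := by
    rw [List.pairwise_append]
    refine ⟨hple, by simp, ?_⟩
    intro x hx y hy
    simp at hy
    rcases hy with rfl | rfl
    all_goals exact le_of_lt (htlt x hx)
  have hsx := PySem.List.sorted_id_eq_of_perm_of_pairwise _ _ hys_perm hys_sorted
  rw [hsx]
  refine (ewod_iff _).mpr ⟨t, a, rfl, ?_⟩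
  rw [List.pairwise_append]
  exact ⟨hplt, by simp, fun x hx y hy => by simp at hy; exact hy ▸ htlt x hx⟩

-- the maximum over the distinct elements is the maximum over the list
lemma max_keys_eq_max_list (xs : List Int) (a b : Int)
    (ha : PySem.List.max? (PySem.Set.ofList xs) (fun k => k) = some a)
    (hb : PySem.List.max? xs (fun k => k) = some b) : a = b := by
  have haS := PySem.List.max?_mem ha
  have hbx := PySem.List.max?_mem hb
  have hax : a ∈ xs := (PySem.Set.mem_ofList xs a).mp haS
  have hbS : b ∈ PySem.Set.ofList xs := (PySem.Set.mem_ofList xs b).mpr hbx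
  exact le_antisymm (PySem.List.max?_isMax hb a hax) (PySem.List.max?_isMax ha b hbS)

-- ===== VERDICT (by name: the statement is the Claim_ definition above) =====
theorem is_authentic_collection_spec : Claim_equal_is_authentic_collection := by
  intro xs _ hne
  unfold Spec_is_authentic_collection is_authentic_collection is_authentic_collection_alt
  dsimp only
  have hSne : PySem.Set.ofList xs ≠ [] := by
    intro h
    rcases List.exists_mem_of_ne_nil xs hne with ⟨x, hx⟩
    have := (PySem.Set.mem_ofList xs x).mpr hx
    simp [h] at this
  rw [PySem.Dict.keys_counter]
  rcases hA : PySem.List.max? (PySem.Set.ofList xs) (fun k => k) with _ | a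
  · exact absurd ((PySem.List.max?_eq_none_iff _ _).mp hA) hSne
  rcases hB : PySem.List.max? xs (fun k => k) with _ | b
  · exact absurd ((PySem.List.max?_eq_none_iff _ _).mp hB) hne
  obtain rfl : a = b := max_keys_eq_max_list xs a b hA hB
  have haS := PySem.List.max?_mem hA
  have hax : a ∈ xs := (PySem.Set.mem_ofList xs a).mp haS
  have hamax : ∀ y ∈ xs, y ≤ a := PySem.List.max?_isMax hB
  simp only [PySem.Dict.getD_counter]
  -- name B's value
  by_cases h2 : xs.count a = 2
  case neg =>
    -- A: the count test fails; B: the scan must reject sorted(xs)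
    have h2' : (xs.count a : Int) ≠ 2 := by exact_mod_cast h2
    rw [if_pos h2']
    cases hE : endsWithOneDup (PySem.List.sorted xs (fun x => x) false) with
    | false => simp
    | true =>
      obtain ⟨m, hm, hmle, hc2, -, -, -⟩ := ewod_fwd xs hE
      have : m = a := le_antisymm (hamax m hm) (hmle a hax)
      exact absurd (this ▸ hc2) h2
  case pos =>
    have h2' : (xs.count a : Int) = 2 := by exact_mod_cast h2
    rw [if_neg (by omega)]
    -- rewrite A's values-loop over the updated counter
    have hnd : (PySem.Dict.counter xs).keys.Nodup := PySem.Dict.nodup_keys_counter xs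
    have hcont : (PySem.Dict.counter xs).contains a = true := by
      rw [PySem.Dict.contains_iff_mem_keys, PySem.Dict.keys_counter]; exact haS
    have hkeys2 : ((PySem.Dict.counter xs).insert a 1).keys = (PySem.Dict.counter xs).keys :=
      PySem.Dict.keys_insert_of_contains _ 1 hcont
    have hnd2 : ((PySem.Dict.counter xs).insert a 1).keys.Nodup := by rw [hkeys2]; exact hnd
    have hvals : ((PySem.Dict.counter xs).insert a 1).values
        = ((PySem.Dict.counter xs).insert a 1).keys.map
            (fun k => ((PySem.Dict.counter xs).insert a 1).getD k 0) :=
      PySem.Dict.values_eq_map_keys _ hnd2 0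
    rw [hvals, hkeys2, PySem.Dict.keys_counter, List.any_map]
    have hany : ((PySem.Set.ofList xs).any
          ((fun i => decide (i ≠ 1)) ∘ fun k => ((PySem.Dict.counter xs).insert a 1).getD k 0))
        = ((PySem.Set.ofList xs).any (fun k => decide (k ≠ a) && decide (xs.count k ≠ 1))) := by
      apply PySem.List.any_congr_mem
      intro k hk
      simp only [Function.comp_apply]
      rw [PySem.Dict.getD_insert]
      by_cases hka : k = a
      · simp [hka]
      · have : ((PySem.Dict.counter xs).getD k 0) = (xs.count k : Int) :=
          PySem.Dict.getD_counter xs k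
        simp only [if_neg hka, this]
        by_cases h1 : xs.count k = 1 <;> simp [hka, h1]
    rw [hany]
    by_cases hall : ∀ k ∈ xs, k ≠ a → xs.count k = 1
    · -- both conditions hold: A returns its length test; so does B, on the same numbers
      have hanyf : ((PySem.Set.ofList xs).any
          (fun k => decide (k ≠ a) && decide (xs.count k ≠ 1))) = false := by
        rw [List.any_eq_false]
        intro k hk
        by_cases hka : k = a
        · simp [hka]
        · simp [hka, hall k ((PySem.Set.mem_ofList xs k).mp hk) hka]
      rw [hanyf, if_neg (by simp)]
      have hE := ewod_bwd xs a hax hamax h2 hall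
      obtain ⟨m, hm, hmle, -, -, hlenid, hget⟩ := ewod_fwd xs hE
      obtain rfl : m = a := le_antisymm (hamax m hm) (hmle a hax)
      rw [hE, hget]
      have hslen : (PySem.List.sorted xs (fun x => x) false).length = xs.length :=
        (PySem.List.sorted_perm ..).length_eq
      rw [hslen]
      simp only [Bool.true_and]
      have hcast : (xs.length : Int) = ((PySem.Set.ofList xs).length : Int) + 1 := by
        exact_mod_cast hlenid
      congr 1
      rw [eq_iff_iff]
      constructor <;> intro h h' <;> exact h (by omega)
    · -- A's per-count loop fires; B's scan must reject sorted(xs)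
      have hanyt : ((PySem.Set.ofList xs).any
          (fun k => decide (k ≠ a) && decide (xs.count k ≠ 1))) = true := by
        rw [not_forall] at hall
        simp only [not_forall, exists_prop] at hall
        obtain ⟨k, hkx, hka, hk1⟩ := hall
        rw [List.any_eq_true]
        exact ⟨k, (PySem.Set.mem_ofList xs k).mpr hkx, by simp [hka, hk1]⟩
      rw [hanyt, if_pos (by simp)]
      cases hE : endsWithOneDup (PySem.List.sorted xs (fun x => x) false) with
      | false => simp
      | true =>
        obtain ⟨m, hm, hmle, -, hc1, -, -⟩ := ewod_fwd xs hE
        obtain rfl : m = a := le_antisymm (hamax m hm) (hmle a hax)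
        exact absurd hc1 hall
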